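-- pv_equiv track=rewrite | github.com/ToiletCommander/hog_contest_2021_cookes | gamecalc.py | calc_turn_score
-- ===== SOURCE A (Python) =====
-- def piggy_points(score):
--     """Return the points scored from rolling 0 dice.
--
--     score:  The opponent's current score.
--     """
--     # BEGIN PROBLEM 2
--     scoreSq = score ** 2
--     smallestDigit = -1
--     while scoreSq > 0:
--         currentDigit = scoreSq % 10
--         scoreSq = scoreSq // 10
--         if currentDigit < smallestDigit or smallestDigit == -1:
--             smallestDigit = currentDigit
--     if smallestDigit == -1:
--         smallestDigit = 0
--
--     returnVal = smallestDigit + 3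
--     return returnVal
--
-- def calc_turn_score(diceOutcomes,opponent_score):
--     if(len(diceOutcomes) == 0):
--         return piggy_points(opponent_score)
--     sumScore = 0
--     for i in range(len(diceOutcomes)):
--         if diceOutcomes[i] != 1:
--             sumScore += diceOutcomes[i]
--         else:
--             sumScore = 1
--             break
--     return sumScore
-- ===== SOURCE B (Python) =====
-- def _seg(xs):
--     """(sum of xs, whether 1 occurs in xs), computed by divide and conquer on halves."""
--     if len(xs) == 0:
--         return (0, False)
--     if len(xs) == 1:
--         return (xs[0], xs[0] == 1)
--     mid = len(xs) // 2
--     sl, hl = _seg(xs[:mid])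
--     sr, hr = _seg(xs[mid:])
--     return (sl + sr, hl or hr)
--
-- def calc_turn_score(diceOutcomes, opponent_score):
--     if len(diceOutcomes) == 0:
--         # piggy points: smallest candidate digit 0..9 that occurs in str(score**2).
--         sq = str(opponent_score ** 2)
--         return next(d for d in range(10) if str(d) in sq) + 3
--     total, has_one = _seg(diceOutcomes)
--     return 1 if has_one else total
-- ===== Notes on version B (the rewrite author's own statement) =====
-- stated objective: alternative
-- what changed: The dice branch becomes a divide-and-conquer helper that splits the list in halves and combines (sum, contains-1) pairs instead of A's fused left-to-right accumulate-with-break loop, and the piggy branch searches the candidate digits 0..9 in increasing order for the first one occurring in str(score**2) instead of A's mod/div digit-extraction loop maintaining a running minimum with a -1 sentinel.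
import Mathlib
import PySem

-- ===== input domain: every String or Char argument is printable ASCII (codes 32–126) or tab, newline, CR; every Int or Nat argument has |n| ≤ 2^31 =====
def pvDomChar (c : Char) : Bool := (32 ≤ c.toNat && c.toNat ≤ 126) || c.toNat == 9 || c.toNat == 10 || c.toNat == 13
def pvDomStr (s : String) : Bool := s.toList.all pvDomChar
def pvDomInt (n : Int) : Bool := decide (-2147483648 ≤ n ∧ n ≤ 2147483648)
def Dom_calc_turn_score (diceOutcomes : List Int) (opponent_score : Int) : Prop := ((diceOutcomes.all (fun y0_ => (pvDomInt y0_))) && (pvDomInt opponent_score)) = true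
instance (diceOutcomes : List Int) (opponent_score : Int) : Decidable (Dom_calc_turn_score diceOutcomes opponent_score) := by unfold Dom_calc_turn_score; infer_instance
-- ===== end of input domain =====

-- B replaces A's fused accumulate-with-break index loop by a divide-and-conquer over list halves
-- returning (sum, contains-1), and A's mod/div digit-extraction minimum loop by a search over the
-- candidate digits 0..9 for the first one occurring in str(score**2) (objective: alternative).


-- ===== PORT A =====
-- A's `while scoreSq > 0` digit-extraction loop, carrying the smallestDigit accumulator.
def piggyLoop (scoreSq smallestDigit : Int) : Int :=
  if _h : 0 < scoreSq then
    let currentDigit := PySem.Int.mod scoreSq 10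
    piggyLoop (PySem.Int.floordiv scoreSq 10)
      (if currentDigit < smallestDigit ∨ smallestDigit = -1 then currentDigit else smallestDigit)
  else smallestDigit
termination_by scoreSq.toNat
decreasing_by
  rw [PySem.Int.floordiv_eq_ediv_of_pos (by norm_num)]
  omega

def piggy_points (score : Int) : Int :=
  let scoreSq := score ^ 2
  let smallestDigit := piggyLoop scoreSq (-1)
  let smallestDigit := if smallestDigit = -1 then 0 else smallestDigit
  smallestDigit + 3

-- A's `for i in range(len(diceOutcomes))` loop with the `break` (iterating the list directly).
def sumLoop : List Int → Int → Int
  | [], sumScore => sumScore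
  | x :: xs, sumScore => if x ≠ 1 then sumLoop xs (sumScore + x) else 1

def calc_turn_score (diceOutcomes : List Int) (opponent_score : Int) : Int :=
  if diceOutcomes.length = 0 then piggy_points opponent_score
  else sumLoop diceOutcomes 0

-- ===== PORT B =====
-- _seg(xs): (sum of xs, whether 1 occurs), by divide and conquer on the two halves
-- (xs[:mid] / xs[mid:] via PySem.List.slice; len(xs)//2 with len ≥ 0 is Nat division).
def pvSeg (xs : List Int) : Int × Bool :=
  if xs.length = 0 then (0, false)
  else if h1 : xs.length = 1 then
    (xs[0]'(by omega), xs[0]'(by omega) == 1)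
  else
    let mid : Nat := xs.length / 2
    let l := pvSeg (PySem.List.slice xs none (some (mid : Int)))
    let r := pvSeg (PySem.List.slice xs (some (mid : Int)) none)
    (l.1 + r.1, l.2 || r.2)
termination_by xs.length
decreasing_by
  · rw [PySem.List.slice_to_natCast]; simp [List.length_take]; omega
  · rw [PySem.List.slice_from_natCast]; simp [List.length_drop]; omega

def calc_turn_score_alt (diceOutcomes : List Int) (opponent_score : Int) : Int :=
  if diceOutcomes.length = 0 then
    -- next(d for d in range(10) if str(d) in sq) + 3
    let sq := PySem.Int.toStr (opponent_score ^ 2)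
    match (PySem.List.pyRange 0 10 1).find? (fun d => PySem.Str.isIn (PySem.Int.toStr d) sq) with
    | some d => d + 3
    | none => 0  -- unreachable (Python: StopIteration): str of a nonnegative int always contains a digit
  else
    let p := pvSeg diceOutcomes
    if p.2 then 1 else p.1

-- ===== PRECONDITION & SPEC =====
def Spec_calc_turn_score (diceOutcomes : List Int) (opponent_score : Int) (out : Int) : Prop := out = calc_turn_score_alt diceOutcomes opponent_score
instance (diceOutcomes : List Int) (opponent_score : Int) (out : Int) : Decidable (Spec_calc_turn_score diceOutcomes opponent_score out) := by unfold Spec_calc_turn_score; infer_instance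

-- ===== CLAIM (what is proved, stated in full; the proofs are below) =====
def Claim_equal_calc_turn_score : Prop := ∀ (diceOutcomes : List Int) (opponent_score : Int), Dom_calc_turn_score diceOutcomes opponent_score → Spec_calc_turn_score diceOutcomes opponent_score (calc_turn_score diceOutcomes opponent_score)

-- ===== LEMMAS AND PROOFS =====

-- A's step function on the smallestDigit accumulator.
def pvStep (s : Int) (d : Nat) : Int := if (d : Int) < s ∨ s = -1 then (d : Int) else s

-- A's while loop computes a fold of pvStep over the base-10 digit list.
theorem piggyLoop_digits (n : Nat) : ∀ m : Int,
    piggyLoop (n : Int) m = (Nat.digits 10 n).foldl pvStep m := by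
  induction n using Nat.strong_induction_on with
  | _ n ih =>
    intro m
    rcases Nat.eq_zero_or_pos n with h0 | hp
    · subst h0; rw [piggyLoop]; simp
    · rw [piggyLoop, dif_pos (by exact_mod_cast hp)]
      rw [Nat.digits_def' (by norm_num : 1 < 10) hp]
      have hm : PySem.Int.mod (n : Int) 10 = ((n % 10 : Nat) : Int) := PySem.Int.mod_natCast n 10
      have hf : PySem.Int.floordiv (n : Int) 10 = ((n / 10 : Nat) : Int) := PySem.Int.floordiv_natCast n 10
      simp only [List.foldl_cons, hm, hf]
      rw [ih (n / 10) (Nat.div_lt_self hp (by norm_num))]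
      rfl

theorem foldl_step_eq_min (ds : List Nat) : ∀ s : Int, 0 ≤ s →
    ds.foldl pvStep s = (ds.map (fun d : Nat => (d : Int))).foldl min s := by
  induction ds with
  | nil => intro s _; rfl
  | cons d ds ih =>
    intro s hs
    simp only [List.foldl_cons, List.map_cons]
    have h1 : pvStep s d = min s (d : Int) := by
      simp only [pvStep]
      rcases lt_or_ge (d : Int) s with h | h
      · rw [if_pos (Or.inl h), min_eq_right h.le]
      · rw [if_neg (by omega), min_eq_left h]
    rw [h1, ih _ (le_min hs (by positivity))]

-- Nat.toDigitsCore with enough fuel produces the reversed digit list (as characters).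
theorem toDigitsCore_eq (fuel : Nat) : ∀ (n : Nat) (acc : List Char), 0 < n → n < fuel →
    Nat.toDigitsCore 10 fuel n acc = ((Nat.digits 10 n).map Nat.digitChar).reverse ++ acc := by
  induction fuel with
  | zero => intro n acc _ h; omega
  | succ f ih =>
    intro n acc hn hf
    have hstep : Nat.toDigitsCore 10 (f + 1) n acc =
        (if n / 10 = 0 then (n % 10).digitChar :: acc
         else Nat.toDigitsCore 10 f (n / 10) ((n % 10).digitChar :: acc)) := by
      simp [Nat.toDigitsCore]
    rw [hstep, Nat.digits_def' (by norm_num : 1 < 10) hn]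
    by_cases h0 : n / 10 = 0
    · rw [if_pos h0, h0]
      simp
    · rw [if_neg h0, ih (n / 10) _ (Nat.pos_of_ne_zero h0)
        (by have := Nat.div_lt_self hn (by norm_num : 1 < 10); omega)]
      rw [Nat.digits_def' (by norm_num : 1 < 10) (Nat.pos_of_ne_zero h0)] at *
      simp

-- str(n) for positive n is the reversed digit list rendered through Nat.digitChar.
theorem toChars_eq (n : Nat) (hn : 0 < n) :
    PySem.Int.toChars (n : Int) = ((Nat.digits 10 n).map Nat.digitChar).reverse := by
  have h1 : PySem.Int.toChars (n : Int) = Nat.toDigits 10 n := by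
    simp [PySem.Int.toChars]
  rw [h1]
  show Nat.toDigitsCore 10 (n + 1) n [] = _
  rw [toDigitsCore_eq (n + 1) n [] hn (by omega), List.append_nil]

-- digitChar is injective below 10.
theorem digitChar_inj : ∀ j < 10, ∀ k < 10, Nat.digitChar j = Nat.digitChar k → j = k := by decide

-- B's membership test 'str(d) in sq' reads: d's digit occurs among n's digits (0 ≤ d ≤ 9, n > 0).
theorem isIn_digit (n : Nat) (hn : 0 < n) (d : Int) (hd0 : 0 ≤ d) (hd9 : d ≤ 9) :
    PySem.Chars.isIn (PySem.Int.toChars d) (PySem.Int.toChars (n : Int)) = true ↔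
      d.toNat ∈ Nat.digits 10 n := by
  have hchar : PySem.Int.toChars d = [Nat.digitChar d.toNat] := by
    interval_cases d <;> rfl
  rw [hchar, PySem.Chars.isIn_iff_infix, List.singleton_infix_iff, toChars_eq n hn,
      List.mem_reverse, List.mem_map]
  constructor
  · rintro ⟨k, hk, hkd⟩
    have hk10 : k < 10 := Nat.digits_lt_base (by norm_num) hk
    have hd10 : d.toNat < 10 := by omega
    rwa [digitChar_inj k hk10 d.toNat hd10 hkd] at hk
  · intro h; exact ⟨d.toNat, h, rfl⟩

-- find? over range(a, b) returns the element m when m satisfies P and nothing before it does.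
theorem find?_pyRange_eq (P : Int → Bool) (m : Int) : ∀ a b : Int, a ≤ m → m < b → P m = true →
    (∀ d : Int, a ≤ d → d < m → P d = false) →
    (PySem.List.pyRange a b 1).find? P = some m := by
  intro a b
  induction hab : (b - a).toNat generalizing a with
  | zero => intro ham hmb _ _; omega
  | succ k ih =>
    intro ham hmb hPm hlt
    rw [PySem.List.pyRange_one_cons (by omega)]
    rcases eq_or_lt_of_le ham with rfl | hlt'
    · rw [List.find?_cons_of_pos hPm]
    · rw [List.find?_cons_of_neg (by simp [hlt a le_rfl hlt'])]
      exact ih (a + 1) (by omega) (by omega) (by omega) hPm (fun d hd1 hd2 => hlt d (by omega) hd2)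

-- B's divide-and-conquer returns (sum, contains 1).
theorem pvSeg_eq (xs : List Int) : pvSeg xs = (xs.sum, xs.contains 1) := by
  induction hn : xs.length using Nat.strong_induction_on generalizing xs with
  | _ n ih =>
    rw [pvSeg]
    rcases xs with _ | ⟨x, ys⟩
    · simp
    · rcases ys with _ | ⟨y, zs⟩
      · simp only [List.length_cons, List.length_nil]
        norm_num
        by_cases hx : x = 1
        · subst hx; simp
        · simp [hx, Ne.symm hx]
      · have hlen : ¬ (x :: y :: zs).length = 0 := by simp
        simp only [if_neg hlen, dif_neg (show ¬ (x :: y :: zs).length = 1 by simp),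
          PySem.List.slice_to_natCast, PySem.List.slice_from_natCast]
        set l := x :: y :: zs
        have h2 : 2 ≤ l.length := by simp [l]
        have hto := ih (l.take (l.length / 2)).length
          (by simp only [List.length_take]; omega) _ rfl
        have hfrom := ih (l.drop (l.length / 2)).length
          (by simp only [List.length_drop]; omega) _ rfl
        simp only [hto, hfrom]
        have hsplit : l.take (l.length / 2) ++ l.drop (l.length / 2) = l := List.take_append_drop _ _
        rw [Prod.mk.injEq]
        refine ⟨?_, ?_⟩
        · rw [← List.sum_append, hsplit]
        · rw [← List.contains_append, hsplit]

-- A's break loop: 1 if 1 occurs, else the sum.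
theorem sumLoop_eq (l : List Int) : ∀ acc : Int,
    sumLoop l acc = if l.contains 1 then 1 else acc + l.sum := by
  induction l with
  | nil => intro acc; simp [sumLoop]
  | cons x xs ih =>
    intro acc
    by_cases hx : x = 1
    · subst hx; simp [sumLoop]
    · rw [show sumLoop (x :: xs) acc = sumLoop xs (acc + x) from by simp [sumLoop, hx]]
      rw [ih]
      have h1 : ¬ (1 : Int) = x := fun h => hx h.symm
      simp only [List.contains_cons, List.sum_cons]
      by_cases h2 : (1 : Int) ∈ xs
      · simp [h2]
      · simp [h2, h1]
        ring

theorem foldl_min_nonneg (l : List Int) : ∀ s : Int, 0 ≤ s → (∀ x ∈ l, 0 ≤ x) →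
    0 ≤ l.foldl min s := by
  induction l with
  | nil => intro s hs _; exact hs
  | cons x xs ih =>
    intro s hs hl
    exact ih _ (le_min hs (hl x (by simp))) (fun y hy => hl y (by simp [hy]))

-- ===== VERDICT (by name: the statement is the Claim_ definition above) =====
theorem calc_turn_score_spec : Claim_equal_calc_turn_score := by
  intro diceOutcomes opponent_score _
  unfold Spec_calc_turn_score calc_turn_score calc_turn_score_alt
  cases diceOutcomes with
  | cons x xs =>
    rw [if_neg (by simp : ¬((x :: xs).length = 0)), if_neg (by simp : ¬((x :: xs).length = 0))]
    rw [sumLoop_eq, zero_add, pvSeg_eq]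
  | nil =>
    rw [if_pos (show ([] : List Int).length = 0 from rfl), if_pos (show ([] : List Int).length = 0 from rfl)]
    set n : Nat := (opponent_score ^ 2).toNat with hn
    have hcast : opponent_score ^ 2 = (n : Int) := by
      rw [hn, Int.toNat_of_nonneg (sq_nonneg opponent_score)]
    rcases Nat.eq_zero_or_pos n with h0 | hp
    · -- score² = 0: A yields 0 + 3, B's first candidate digit 0 occurs in "0"
      simp only [piggy_points]
      rw [hcast, h0, Nat.cast_zero,
          show piggyLoop (0 : Int) (-1) = -1 from by rw [piggyLoop]; norm_num,
          if_pos rfl]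
      decide
    · -- score² > 0: both sides find the minimum digit of score²
      simp only [piggy_points]
      rw [hcast, piggyLoop_digits]
      have hne : Nat.digits 10 n ≠ [] := Nat.digits_ne_nil_iff_ne_zero.mpr (by omega)
      obtain ⟨d, ds, hds⟩ := List.exists_cons_of_ne_nil hne
      rw [hds]
      -- the minimum digit M, as an Int
      have hfirst : pvStep (-1) d = (d : Int) := by simp [pvStep]
      rw [List.foldl_cons, hfirst, foldl_step_eq_min ds _ (by positivity)]
      set M : Int := (ds.map (fun x : Nat => (x : Int))).foldl min (d : Int) with hM
      have hmem : M = (d : Int) ∨ M ∈ ds.map (fun x : Nat => (x : Int)) :=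
        PySem.List.foldl_min_mem _ _
      have hMdig : M.toNat ∈ Nat.digits 10 n := by
        rw [hds]
        rcases hmem with h | h
        · have hMd : M.toNat = d := by omega
          rw [hMd]; exact List.mem_cons_self
        · obtain ⟨k, hk, hkM⟩ := List.mem_map.mp h
          have hMk : M.toNat = k := by omega
          rw [hMk]
          exact List.mem_cons_of_mem _ hk
      have hM0 : 0 ≤ M := by
        refine foldl_min_nonneg _ _ (by positivity) ?_
        intro y hy
        obtain ⟨k, _, rfl⟩ := List.mem_map.mp hy
        positivity
      have hM9 : M ≤ 9 := by
        have := Nat.digits_lt_base (by norm_num : 1 < 10) hMdig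
        omega
      have hle := PySem.List.foldl_min_le (ds.map (fun x : Nat => (x : Int))) (d : Int)
      have hMle : ∀ k ∈ Nat.digits 10 n, M ≤ (k : Int) := by
        intro k hk
        rw [hds] at hk
        rcases List.mem_cons.mp hk with rfl | hk
        · exact hle.1
        · exact hle.2 _ (List.mem_map.mpr ⟨k, hk, rfl⟩)
      rw [if_neg (by omega)]
      have hfind : (PySem.List.pyRange 0 10 1).find?
          (fun e => PySem.Str.isIn (PySem.Int.toStr e) (PySem.Int.toStr (n : Int))) = some M := by
        refine find?_pyRange_eq _ M 0 10 hM0 (by omega) ?_ ?_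
        · simp only [PySem.Str.isIn_eq, PySem.Int.toList_toStr]
          exact (isIn_digit n hp M hM0 hM9).mpr hMdig
        · intro e he0 heM
          simp only [PySem.Str.isIn_eq, PySem.Int.toList_toStr]
          rw [← Bool.not_eq_true]
          intro hcontra
          have := (isIn_digit n hp e he0 (by omega)).mp hcontra
          have := hMle e.toNat this
          omega
      rw [hfind]
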